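-- pv_equiv track=rewrite | github.com/Phazzie/autoclick | src/core/workflow/serialization_utils.py | validate_serialized_object
-- ===== SOURCE A (Python) =====
-- from typing import Dict, Any, List, Optional, Union, Type, TypeVar, Generic, Callable
--
-- def validate_serialized_object(
--     obj: Dict[str, Any],
--     required_fields: List[str],
--     optional_fields: Optional[List[str]] = None
-- ) -> bool:
--     """
--     Validate a serialized object against required and optional fields
--
--     Args:
--         obj: Object to validate
--         required_fields: List of required field names
--         optional_fields: Optional list of optional field names
--
--     Returns:
--         True if the object is valid, False otherwise
--     """
--     if not isinstance(obj, dict):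
--         return False
--
--     # Check required fields
--     for field in required_fields:
--         if field not in obj:
--             return False
--
--     # Check that all fields are either required or optional
--     if optional_fields:
--         allowed_fields = set(required_fields + optional_fields)
--         for field in obj:
--             if field not in allowed_fields:
--                 return False
--
--     return True
-- ===== SOURCE B (Python) =====
-- def validate_serialized_object(obj, required_fields, optional_fields=None):
--     if not isinstance(obj, dict):
--         return False
--     missing = set(required_fields)
--     if optional_fields:
--         allowed = missing | set(optional_fields)
--         for key in obj:
--             if key not in allowed:
--                 return False
--             missing.discard(key)
--     else:
--         for key in obj:
--             missing.discard(key)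
--     return not missing
-- ===== Notes on version B (the rewrite author's own statement) =====
-- stated objective: alternative
-- what changed: B makes a single pass over the object's keys with a shrinking 'missing required fields' accumulator (discarding each seen key, rejecting a disallowed key on sight) and decides validity by whether the accumulator is empty, instead of A's staged loop over required_fields probing the dict followed by a second loop over the dict probing the allowed set.
import Mathlib
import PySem

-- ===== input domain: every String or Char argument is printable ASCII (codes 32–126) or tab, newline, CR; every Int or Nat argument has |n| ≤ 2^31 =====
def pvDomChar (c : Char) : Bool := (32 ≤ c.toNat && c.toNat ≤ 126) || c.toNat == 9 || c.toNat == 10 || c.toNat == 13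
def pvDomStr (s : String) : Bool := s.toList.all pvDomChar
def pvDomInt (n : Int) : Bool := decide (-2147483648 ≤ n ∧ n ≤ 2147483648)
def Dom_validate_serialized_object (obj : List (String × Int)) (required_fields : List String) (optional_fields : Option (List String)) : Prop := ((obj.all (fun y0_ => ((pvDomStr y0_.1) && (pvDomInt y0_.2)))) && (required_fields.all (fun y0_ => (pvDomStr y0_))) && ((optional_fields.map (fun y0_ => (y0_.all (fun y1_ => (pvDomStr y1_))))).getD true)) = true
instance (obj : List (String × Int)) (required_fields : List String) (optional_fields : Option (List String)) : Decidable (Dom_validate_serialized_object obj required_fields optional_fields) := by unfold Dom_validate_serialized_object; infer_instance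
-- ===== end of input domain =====

-- B replaces A's staged loops (over required_fields, then over the dict) by a single pass over the
-- dict's keys with a shrinking 'missing required fields' accumulator; same cost (objective: alternative).

-- ===== PORT A =====
-- Port of A: the two staged `for … return False` loops become all/any over the same elements.
-- (The `isinstance(obj, dict)` guard is vacuously true under the type convention.)
def validate_serialized_object (obj : List (String × Int)) (required_fields : List String) (optional_fields : Option (List String)) : Bool :=
  -- for field in required_fields: if field not in obj: return False
  if !(required_fields.all (fun field => obj.any (fun p => p.1 == field))) then false
  else
    -- if optional_fields:  (truthy: some non-empty list)
    match optional_fields with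
    | some l =>
      if !l.isEmpty then
        -- allowed_fields = set(required_fields + optional_fields); for field in obj: if field not in allowed_fields: return False
        if !(obj.all (fun p => PySem.Set.contains (PySem.Set.ofList (required_fields ++ l)) p.1)) then false else true
      else true
    | none => true

-- ===== PORT B =====
-- B's loop without the allowed-set check: for key in obj: missing.discard(key)
def pvAltDiscardLoop (missing : PySem.Set String) : List (String × Int) → PySem.Set String
  | [] => missing
  | p :: rest => pvAltDiscardLoop (PySem.Set.discard missing p.1) rest

-- B's loop with the allowed-set check; none = early `return False`
def pvAltCheckLoop (allowed : PySem.Set String) (missing : PySem.Set String) : List (String × Int) → Option (PySem.Set String)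
  | [] => some missing
  | p :: rest =>
    if !(PySem.Set.contains allowed p.1) then none
    else pvAltCheckLoop allowed (PySem.Set.discard missing p.1) rest

-- Port of B: one pass over the dict's keys, shrinking the set of still-missing required fields.
def validate_serialized_object_alt (obj : List (String × Int)) (required_fields : List String) (optional_fields : Option (List String)) : Bool :=
  let missing := PySem.Set.ofList required_fields
  match optional_fields with
  | some l =>
    if !l.isEmpty then
      match pvAltCheckLoop (PySem.Set.union missing l) missing obj with
      | none => false
      | some m => m.isEmpty        -- return not missing
    else (pvAltDiscardLoop missing obj).isEmpty
  | none => (pvAltDiscardLoop missing obj).isEmpty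

-- ===== PRECONDITION & SPEC =====
def Spec_validate_serialized_object (obj : List (String × Int)) (required_fields : List String) (optional_fields : Option (List String)) (out : Bool) : Prop := out = validate_serialized_object_alt obj required_fields optional_fields
instance (obj : List (String × Int)) (required_fields : List String) (optional_fields : Option (List String)) (out : Bool) : Decidable (Spec_validate_serialized_object obj required_fields optional_fields out) := by unfold Spec_validate_serialized_object; infer_instance

-- ===== CLAIM =====
def Claim_equal_validate_serialized_object : Prop := ∀ (obj : List (String × Int)) (required_fields : List String) (optional_fields : Option (List String)), Dom_validate_serialized_object obj required_fields optional_fields → Spec_validate_serialized_object obj required_fields optional_fields (validate_serialized_object obj required_fields optional_fields)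

-- ===== LEMMAS AND PROOFS =====

theorem mem_pvAltDiscardLoop (l : List (String × Int)) (missing : PySem.Set String) (x : String) :
    x ∈ pvAltDiscardLoop missing l ↔ x ∈ missing ∧ x ∉ l.map Prod.fst := by
  induction l generalizing missing with
  | nil => simp [pvAltDiscardLoop]
  | cons p rest ih =>
    simp [pvAltDiscardLoop, ih, PySem.Set.mem_discard]
    tauto

theorem isEmpty_pvAltDiscardLoop (l : List (String × Int)) (missing : PySem.Set String) :
    (pvAltDiscardLoop missing l).isEmpty = true ↔ ∀ x ∈ missing, x ∈ l.map Prod.fst := by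
  rw [List.isEmpty_iff, List.eq_nil_iff_forall_not_mem]
  constructor
  · intro h x hx
    by_contra hnx
    exact h x ((mem_pvAltDiscardLoop l missing x).2 ⟨hx, hnx⟩)
  · intro h x hx
    rcases (mem_pvAltDiscardLoop l missing x).1 hx with ⟨h1, h2⟩
    exact h2 (h x h1)

theorem pvAltCheckLoop_eq (l : List (String × Int)) (allowed missing : PySem.Set String) :
    pvAltCheckLoop allowed missing l =
      if l.all (fun p => PySem.Set.contains allowed p.1) then some (pvAltDiscardLoop missing l)
      else none := by
  induction l generalizing missing with
  | nil => simp [pvAltCheckLoop, pvAltDiscardLoop]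
  | cons p rest ih =>
    simp only [pvAltCheckLoop, pvAltDiscardLoop, List.all_cons, ih]
    cases hc : PySem.Set.contains allowed p.1
    · simp
    · simp only [Bool.not_true, Bool.false_eq_true, if_false, Bool.true_and]

theorem required_check_iff (obj : List (String × Int)) (req : List String) :
    (req.all (fun field => obj.any (fun p => p.1 == field))) = true
      ↔ ∀ x ∈ PySem.Set.ofList req, x ∈ obj.map Prod.fst := by
  simp only [List.all_eq_true, List.any_eq_true, PySem.Set.mem_ofList, List.mem_map, beq_iff_eq]

theorem ports_agree (obj : List (String × Int)) (req : List String) (opt : Option (List String)) :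
    validate_serialized_object obj req opt = validate_serialized_object_alt obj req opt := by
  unfold validate_serialized_object validate_serialized_object_alt
  have hmain : (req.all (fun field => obj.any (fun p => p.1 == field)))
      = (pvAltDiscardLoop (PySem.Set.ofList req) obj).isEmpty := by
    rw [Bool.eq_iff_iff, required_check_iff obj req,
      isEmpty_pvAltDiscardLoop obj (PySem.Set.ofList req)]
  cases opt with
  | none =>
    dsimp only
    cases hq : (req.all (fun field => obj.any (fun p => p.1 == field))) <;>
      rw [hq] at hmain <;> simp [← hmain]
  | some l =>
    have hallow : (obj.all (fun p => PySem.Set.contains (PySem.Set.ofList (req ++ l)) p.1))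
        = (obj.all (fun p => PySem.Set.contains (PySem.Set.union (PySem.Set.ofList req) l) p.1)) := by
      rw [Bool.eq_iff_iff]
      simp [List.all_eq_true, PySem.Set.mem_ofList,
        PySem.Set.mem_union, List.mem_append]
    dsimp only
    rw [pvAltCheckLoop_eq, ← hallow]
    cases hl : l.isEmpty <;>
      cases hq : (req.all (fun field => obj.any (fun p => p.1 == field))) <;>
        rw [hq] at hmain <;>
          cases hall : (obj.all (fun p => PySem.Set.contains (PySem.Set.ofList (req ++ l)) p.1)) <;>
            simp [← hmain]

-- ===== VERDICT =====
theorem validate_serialized_object_spec : Claim_equal_validate_serialized_object := by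
  intro obj req opt _
  unfold Spec_validate_serialized_object
  exact ports_agree obj req opt
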